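-- pv_equiv track=rewrite | github.com/HydrogenAcid/PDF-extractor-personalizado | PDF-CustomE.py | last_rank_with_min_freq
-- ===== SOURCE A (Python) =====
-- def last_rank_with_min_freq(freqs, min_freq: int):
--     # freqs ordenadas desc; devuelve rank (1-based) del último con f>=min_freq
--     last = 0
--     for i, f in enumerate(freqs, start=1):
--         if f >= min_freq:
--             last = i
--         else:
--             break
--     return last
-- ===== SOURCE B (Python) =====
-- def last_rank_with_min_freq(freqs, min_freq: int):
--     # Scan right-to-left keeping the leftmost index whose value is below
--     # min_freq; that index (or len(freqs) if none) equals the 1-based rank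
--     # of the last element of the leading run with f >= min_freq.
--     rank = len(freqs)
--     for i, f in reversed(list(enumerate(freqs))):
--         if f < min_freq:
--             rank = i
--     return rank
-- ===== Notes on version B (the rewrite author's own statement) =====
-- stated objective: alternative
-- what changed: A scans forward accumulating the last qualifying 1-based rank and breaks at the first failure; B traverses the list in the opposite direction (right-to-left over reversed(enumerate)) with no early exit, keeping the leftmost index below min_freq and defaulting to len(freqs), which equals that rank.
import Mathlib
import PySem

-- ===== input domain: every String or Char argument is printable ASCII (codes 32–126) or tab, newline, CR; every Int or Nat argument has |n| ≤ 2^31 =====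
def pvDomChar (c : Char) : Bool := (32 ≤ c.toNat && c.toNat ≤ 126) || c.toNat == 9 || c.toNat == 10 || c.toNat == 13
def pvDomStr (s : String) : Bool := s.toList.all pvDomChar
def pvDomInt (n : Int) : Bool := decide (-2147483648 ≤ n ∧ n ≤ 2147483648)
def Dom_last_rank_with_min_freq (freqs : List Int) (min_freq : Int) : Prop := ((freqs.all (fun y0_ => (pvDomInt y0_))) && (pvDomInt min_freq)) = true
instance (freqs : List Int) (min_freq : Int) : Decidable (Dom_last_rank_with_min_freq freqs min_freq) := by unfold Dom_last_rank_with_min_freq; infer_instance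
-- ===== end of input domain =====

-- B replaces A's forward early-exit scan by a right-to-left traversal (no early
-- exit) that keeps the leftmost index whose value is below min_freq; alternative
-- decomposition, same O(n) cost.

-- ===== PORT A =====
-- loop state: i = current 1-based index, last = last qualifying rank; 'else: break' returns last
def lastRankLoopA (min_freq : Int) : List Int → Int → Int → Int
  | [], _, last => last
  | f :: rest, i, last =>
      if f ≥ min_freq then lastRankLoopA min_freq rest (i + 1) i
      else last

def last_rank_with_min_freq (freqs : List Int) (min_freq : Int) : Int :=
  lastRankLoopA min_freq freqs 1 0

-- ===== PORT B =====
-- 'for i, f in reversed(list(enumerate(freqs))): if f < min_freq: rank = i'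
-- = a right fold over the (value, index) pairs, initial rank = len(freqs)
def last_rank_with_min_freq_alt (freqs : List Int) (min_freq : Int) : Int :=
  (freqs.zipIdx).foldr
    (fun p rank => if p.1 < min_freq then (p.2 : Int) else rank)
    (freqs.length : Int)

-- ===== PRECONDITION & SPEC =====
def Spec_last_rank_with_min_freq (freqs : List Int) (min_freq : Int) (out : Int) : Prop := out = last_rank_with_min_freq_alt freqs min_freq
instance (freqs : List Int) (min_freq : Int) (out : Int) : Decidable (Spec_last_rank_with_min_freq freqs min_freq out) := by unfold Spec_last_rank_with_min_freq; infer_instance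

-- ===== CLAIM (what is proved, stated in full; the proofs are below) =====
def Claim_equal_last_rank_with_min_freq : Prop := ∀ (freqs : List Int) (min_freq : Int), Dom_last_rank_with_min_freq freqs min_freq → Spec_last_rank_with_min_freq freqs min_freq (last_rank_with_min_freq freqs min_freq)

-- ===== LEMMAS AND PROOFS =====

-- ===== VERDICT (by name: the statement is the Claim_ definition above) =====
-- first index whose value is below m (none if every value qualifies)
def ffi? (m : Int) : List Int → Option Nat
  | [] => none
  | f :: r => if f < m then some 0 else (ffi? m r).map (· + 1)

theorem loopA_eq_ffi (m : Int) (l : List Int) :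
    ∀ i : Int, lastRankLoopA m l (i + 1) i =
      i + (match ffi? m l with
           | some j => (j : Int)
           | none => (l.length : Int)) := by
  induction l with
  | nil => intro i; simp [lastRankLoopA, ffi?]
  | cons f r ih =>
      intro i
      by_cases h : f ≥ m
      · have hlt : ¬ f < m := not_lt.mpr h
        simp only [lastRankLoopA, if_pos h, ffi?, if_neg hlt]
        rw [ih (i + 1)]
        cases hfi : ffi? m r with
        | none => simp; ring
        | some j => simp; ring
      · have hlt : f < m := not_le.mp h
        simp [lastRankLoopA, if_neg h, ffi?, hlt]

theorem foldrB_eq_ffi (m : Int) (l : List Int) :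
    ∀ (k : Nat) (d : Int),
      ((l.zipIdx k).foldr (fun p rank => if p.1 < m then (p.2 : Int) else rank) d) =
        (match ffi? m l with
         | some j => ((k + j : Nat) : Int)
         | none => d) := by
  induction l with
  | nil => intro k d; simp [ffi?]
  | cons f r ih =>
      intro k d
      by_cases h : f < m
      · simp [List.zipIdx_cons, ffi?, h]
      · simp only [List.zipIdx_cons, List.foldr_cons, if_neg h, ffi?]
        rw [ih (k + 1) d]
        cases hfi : ffi? m r with
        | none => simp
        | some j =>
            simp only [Option.map_some]
            congr 1
            omega

theorem last_rank_with_min_freq_spec : Claim_equal_last_rank_with_min_freq := by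
  intro freqs min_freq _
  show last_rank_with_min_freq freqs min_freq = last_rank_with_min_freq_alt freqs min_freq
  have hA := loopA_eq_ffi min_freq freqs 0
  have hB := foldrB_eq_ffi min_freq freqs 0 (freqs.length : Int)
  simp only [last_rank_with_min_freq, last_rank_with_min_freq_alt]
  rw [show (0 : Int) + 1 = 1 from rfl] at hA
  rw [hA, hB]
  cases ffi? min_freq freqs <;> simp
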